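-- pv_equiv track=rewrite | github.com/PoJenCheng/AitherBot_V2.1 | FunctionLib_Robot/_class.py | GetAvg
-- ===== SOURCE A (Python) =====
-- def GetAvg(arr):
--     avgBase = list(arr.values())
--     percentage95 = []
--     for items in avgBase:
--         if items > 95:
--             percentage95.append(items)
--     value90 = min(avgBase)
--     value95 = min(percentage95)
--     return  value90, value95
-- ===== SOURCE B (Python) =====
-- def GetAvg(arr):
--     overall = None
--     over95 = None
--     for v in arr.values():
--         if overall is None or v < overall:
--             overall = v
--         if v > 95 and (over95 is None or v < over95):
--             over95 = v
--     if overall is None: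
--         raise ValueError("min() arg is an empty sequence")
--     if over95 is None:
--         raise ValueError("min() arg is an empty sequence")
--     return overall, over95
-- ===== Notes on version B (the rewrite author's own statement) =====
-- stated objective: alternative
-- what changed: Replaces the filter loop plus two separate min() scans with a single pass that maintains two running minima (overall and >95) in optional accumulators, raising the same ValueErrors in the same order when a minimum is unset.
import Mathlib
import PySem

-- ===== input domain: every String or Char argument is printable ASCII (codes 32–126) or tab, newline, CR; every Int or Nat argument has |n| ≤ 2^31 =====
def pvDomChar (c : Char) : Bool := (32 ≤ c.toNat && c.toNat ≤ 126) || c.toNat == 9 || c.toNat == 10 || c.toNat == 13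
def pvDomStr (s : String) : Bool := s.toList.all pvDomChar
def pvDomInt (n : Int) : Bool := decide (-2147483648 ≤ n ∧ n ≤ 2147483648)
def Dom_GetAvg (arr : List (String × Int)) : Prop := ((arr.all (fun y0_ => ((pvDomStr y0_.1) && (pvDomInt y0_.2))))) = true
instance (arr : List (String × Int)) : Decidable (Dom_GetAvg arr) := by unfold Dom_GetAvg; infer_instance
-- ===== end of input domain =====

-- B replaces A's filter loop plus two min() scans by a single pass keeping two running minima (same ValueErrors, same order).


-- ===== PORT A =====
def GetAvg (arr : List (String × Int)) : Int × Int :=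
  let avgBase := (PySem.Dict.ofList arr).values
  let percentage95 := avgBase.foldl (fun acc x => if x > 95 then acc ++ [x] else acc) []
  let value90 := (PySem.List.min? avgBase (fun y => y)).getD 0   -- min() raises on []: excluded by Pre_
  let value95 := (PySem.List.min? percentage95 (fun y => y)).getD 0
  (value90, value95)

-- ===== PORT B =====
-- one fold step of Source B's loop: update overall min, then (if x > 95) the >95 min
def GetAvg_step (st : Option Int × Option Int) (x : Int) : Option Int × Option Int :=
  let overall := match st.1 with
    | none => some x
    | some m => if x < m then some x else some m
  let over95 := if x > 95 then
      match st.2 with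
      | none => some x
      | some m => if x < m then some x else some m
    else st.2
  (overall, over95)

def GetAvg_alt (arr : List (String × Int)) : Int × Int :=
  let st := ((PySem.Dict.ofList arr).values).foldl GetAvg_step (none, none)
  -- 'raise ValueError' when an accumulator is still None: excluded by Pre_
  ((st.1).getD 0, (st.2).getD 0)

-- ===== PRECONDITION & SPEC =====
-- Pre_ excludes exactly the inputs where Python A raises ValueError: an empty dict
-- (min of no values) or a dict with no value above 95 (min of the empty filtered list).
def Pre_GetAvg (arr : List (String × Int)) : Prop :=
  ∃ v ∈ (PySem.Dict.ofList arr).values, 95 < v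
instance (arr : List (String × Int)) : Decidable (Pre_GetAvg arr) := by unfold Pre_GetAvg; infer_instance
def pvWitness_GetAvg : (List (String × Int)) := [("a", 100), ("b", 90)]

def Spec_GetAvg (arr : List (String × Int)) (out : Int × Int) : Prop := out = GetAvg_alt arr
instance (arr : List (String × Int)) (out : Int × Int) : Decidable (Spec_GetAvg arr out) := by unfold Spec_GetAvg; infer_instance

-- ===== CLAIM (what is proved, stated in full; the proofs are below) =====
def Claim_equal_GetAvg : Prop := ∀ (arr : List (String × Int)), Dom_GetAvg arr → Pre_GetAvg arr → Spec_GetAvg arr (GetAvg arr)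

-- ===== LEMMAS AND PROOFS =====

-- running minimum seeded by an optional accumulator (what one component of B's fold computes)
theorem ite_min (x m : Int) : (if x < m then x else m) = min m x := by
  rw [min_def]; split_ifs <;> omega

def omin (o : Option Int) (l : List Int) : Option Int :=
  match o with
  | some m => some (l.foldl min m)
  | none => match l with
    | [] => none
    | x :: t => some (t.foldl min x)

theorem omin_cons (o : Option Int) (x : Int) (t : List Int) :
    omin o (x :: t) = omin (some ((o.map (min · x)).getD x)) t := by
  cases o with
  | none => simp [omin]
  | some m => simp [omin]

theorem min?_id_eq_omin (l : List Int) :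
    PySem.List.min? l (fun y => y) = omin none l := by
  cases l with
  | nil => simp [PySem.List.min?, omin]
  | cons x t => simp [PySem.List.min?_id_cons, omin]

theorem foldl_step_eq (l : List Int) : ∀ (o o95 : Option Int),
    l.foldl GetAvg_step (o, o95) =
      (omin o l, omin o95 (l.filter (fun x => decide (95 < x)))) := by
  induction l with
  | nil => intro o o95; cases o <;> cases o95 <;> simp [omin]
  | cons x t ih =>
    intro o o95
    by_cases h : 95 < x
    · simp only [List.foldl_cons, List.filter_cons, h, decide_true, if_true]
      rw [ih]
      congr 1
      · rw [omin_cons]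
        cases o with
        | none => simp [GetAvg_step, h]
        | some m =>
          simp only [GetAvg_step, h, Option.map_some, Option.getD_some]
          rw [← apply_ite some, ite_min]
      · rw [omin_cons]
        cases o95 with
        | none => simp [GetAvg_step, h]
        | some m =>
          simp only [GetAvg_step, h, if_true, Option.map_some, Option.getD_some]
          rw [← apply_ite some, ite_min]
    · simp only [List.foldl_cons, List.filter_cons, h, decide_false, if_false,
        Bool.false_eq_true]
      rw [ih]
      congr 1
      · rw [omin_cons]
        cases o with
        | none => simp [GetAvg_step, h]
        | some m =>
          simp only [GetAvg_step, h, Option.map_some, Option.getD_some]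
          rw [← apply_ite some, ite_min]
      · cases o95 with
        | none => simp [GetAvg_step, h]
        | some m => simp [GetAvg_step, h]

-- ===== VERDICT (by name: the statement is the Claim_ definition above) =====
theorem GetAvg_spec : Claim_equal_GetAvg := by
  intro arr _ _
  simp only [Spec_GetAvg, GetAvg, GetAvg_alt, foldl_step_eq,
    PySem.List.foldl_append_ite_eq_filter, List.nil_append, min?_id_eq_omin, gt_iff_lt]
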